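-- pv_equiv track=rewrite | github.com/mchieco/advent-of-code | 2025/day_06/main.py | part1
-- ===== SOURCE A (Python) =====
-- from collections import defaultdict
-- import math
--
-- def part1(data: list[str]) -> int:
--     ans = 0
--
--     problems = defaultdict(list)
--
--     last_row = len(data)-1
--     for idx, line in enumerate(data):
--         for idj, column in enumerate(line.split()):
--             if idx == last_row:
--                 if column == "*":
--                     ans += math.prod(problems[idj])
--                 else:
--                     ans += sum(problems[idj])
--             else:
--                 problems[idj].append(int(column))
--
--     return ans
-- ===== SOURCE B (Python) =====
-- import math
--
-- def part1(data: list[str]) -> int: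
--     if not data:
--         return 0
--     ops = data[-1].split()
--     rows = [line.split() for line in data[:-1]]
--     ans = 0
--     for idj, op in enumerate(ops):
--         vals = [int(r[idj]) for r in rows if idj < len(r)]
--         ans += math.prod(vals) if op == "*" else sum(vals)
--     return ans
-- ===== Notes on version B (the rewrite author's own statement) =====
-- stated objective: simpler
-- what changed: Replaces the fused row-major loop with a defaultdict accumulator by a direct column-major pass: split the last row into operators and the other rows into token lists, then for each operator index gather that column's ints and add their product or sum.
import Mathlib
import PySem

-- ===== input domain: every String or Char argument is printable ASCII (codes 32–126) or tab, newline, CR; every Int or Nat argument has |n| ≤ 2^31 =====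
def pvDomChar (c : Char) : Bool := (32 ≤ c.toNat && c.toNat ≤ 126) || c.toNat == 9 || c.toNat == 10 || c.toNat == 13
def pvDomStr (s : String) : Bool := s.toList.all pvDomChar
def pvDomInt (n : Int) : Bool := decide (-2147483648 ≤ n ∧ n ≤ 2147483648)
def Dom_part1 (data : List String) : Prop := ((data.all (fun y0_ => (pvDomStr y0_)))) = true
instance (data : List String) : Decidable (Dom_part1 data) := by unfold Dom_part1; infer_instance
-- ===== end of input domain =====

-- B replaces A's fused row-major loop + defaultdict accumulator by a direct column-major pass
-- (split rows once, then gather each operator's column); objective: simpler. Equivalence is on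
-- the return value; Pre_ excludes inputs where Python's int() raises ValueError.

-- int(column); Pre_part1 guarantees ofStr? is some, so the getD 0 default is never taken on admitted inputs
def pvIntOf (s : String) : Int := (PySem.Int.ofStr? s).getD 0

-- ===== PORT A =====
-- defaultdict(list) reads are modeled by getD _ []; the defaultdict's side effect of inserting []
-- on a read in the last-row branch is invisible to all later getD _ [] reads, so the value is exact.
def part1 (data : List String) : Int :=
  ((PySem.List.enumerate data 0).foldl
    (fun (st : Int × PySem.Dict Int (List Int)) idxLine =>
      (PySem.List.enumerate (PySem.Str.split₀ idxLine.2) 0).foldl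
        (fun st jc =>
          if idxLine.1 = (data.length : Int) - 1 then
            if jc.2 = "*" then
              (st.1 + (st.2.getD jc.1 []).foldl (· * ·) 1, st.2)
            else
              (st.1 + (st.2.getD jc.1 []).foldl (· + ·) 0, st.2)
          else
            (st.1, st.2.insert jc.1 (st.2.getD jc.1 [] ++ [pvIntOf jc.2]))) st)
    ((0 : Int), (PySem.Dict.mk [] : PySem.Dict Int (List Int)))).1

-- ===== PORT B =====
def part1_alt (data : List String) : Int :=
  match data with
  | [] => 0
  | _ :: _ =>
    let ops := PySem.Str.split₀ (data.getLastD "")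
    let rows := data.dropLast.map PySem.Str.split₀
    (PySem.List.enumerate ops 0).foldl
      (fun ans jop =>
        let vals := (rows.filterMap (fun r => PySem.List.pyGet? r jop.1)).map pvIntOf
        ans + (if jop.2 = "*" then vals.foldl (· * ·) 1 else vals.foldl (· + ·) 0)) 0

-- ===== PRECONDITION & SPEC =====
-- Pre_ excludes exactly the inputs where A raises ValueError: a token of a non-last row that int() rejects.
def Pre_part1 (data : List String) : Prop :=
  ∀ line ∈ data.dropLast, ∀ tok ∈ PySem.Str.split₀ line, (PySem.Int.ofStr? tok).isSome = true
instance (data : List String) : Decidable (Pre_part1 data) := by unfold Pre_part1; infer_instance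
def pvWitness_part1 : List String := ["1 2", "3 4 5", "* +"]
def Spec_part1 (data : List String) (out : Int) : Prop := out = part1_alt data
instance (data : List String) (out : Int) : Decidable (Spec_part1 data out) := by unfold Spec_part1; infer_instance

-- ===== CLAIM (what is proved, stated in full; the proofs are below) =====
def Claim_equal_part1 : Prop := ∀ (data : List String), Dom_part1 data → Pre_part1 data → Spec_part1 data (part1 data)

-- ===== LEMMAS AND PROOFS =====

-- the dict update A performs on one non-last row
def pvAddRow (d : PySem.Dict Int (List Int)) (toks : List String) : PySem.Dict Int (List Int) :=
  (PySem.List.enumerate toks 0).foldl (fun d jc => d.insert jc.1 (d.getD jc.1 [] ++ [pvIntOf jc.2])) d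

theorem pv_foldl_pair {α β γ : Type} (l : List γ) (g : β → γ → β) (a : α) (d : β) :
    l.foldl (fun st x => (st.1, g st.2 x)) (a, d) = (a, l.foldl g d) := by
  induction l generalizing d with
  | nil => rfl
  | cons x xs ih => simpa using ih (g d x)

theorem pv_foldl_sumphase (l : List (Int × String)) (a : Int) (d : PySem.Dict Int (List Int)) :
    (l.foldl (fun (st : Int × PySem.Dict Int (List Int)) jc =>
        if jc.2 = "*" then (st.1 + (st.2.getD jc.1 []).foldl (· * ·) 1, st.2)
        else (st.1 + (st.2.getD jc.1 []).foldl (· + ·) 0, st.2)) (a, d)).1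
      = l.foldl (fun ans jc => ans +
          (if jc.2 = "*" then (d.getD jc.1 []).foldl (· * ·) 1
           else (d.getD jc.1 []).foldl (· + ·) 0)) a := by
  induction l generalizing a with
  | nil => rfl
  | cons jc l ih =>
    by_cases hop : jc.2 = "*" <;> simp [hop, ih]

theorem pv_addRow_aux (toks : List String) (s : Int) (d : PySem.Dict Int (List Int)) (j : Int) :
    ((PySem.List.enumerate toks s).foldl
        (fun d jc => d.insert jc.1 (d.getD jc.1 [] ++ [pvIntOf jc.2])) d).getD j []
      = d.getD j [] ++ (if s ≤ j then ((PySem.List.pyGet? toks (j - s)).map pvIntOf).toList else []) := by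
  induction toks generalizing s d with
  | nil => simp [PySem.List.enumerate_nil, PySem.List.pyGet?]
  | cons t ts ih =>
    rw [PySem.List.enumerate_cons, List.foldl_cons, ih, PySem.Dict.getD_insert]
    by_cases hj : j = s
    · subst hj
      simp [PySem.List.pyGet?, PySem.List.pyIdx?]
    · rw [if_neg hj]
      by_cases h1 : s + 1 ≤ j
      · have h0 : s ≤ j := by omega
        rw [if_pos h1, if_pos h0]
        have hk : j - s = ((j - s).toNat : Int) := by omega
        have hk' : j - (s + 1) = (((j - s).toNat - 1 : Nat) : Int) := by omega
        rw [hk, hk', PySem.List.pyGet?_natCast, PySem.List.pyGet?_natCast]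
        have : (j - s).toNat = ((j - s).toNat - 1) + 1 := by omega
        rw [this]
        simp
      · have h0 : ¬ s ≤ j := by omega
        rw [if_neg h1, if_neg h0]

theorem pv_addRow_getD (toks : List String) (d : PySem.Dict Int (List Int)) (j : Int) (hj : 0 ≤ j) :
    (pvAddRow d toks).getD j [] = d.getD j [] ++ ((PySem.List.pyGet? toks j).map pvIntOf).toList := by
  have := pv_addRow_aux toks 0 d j
  simpa [pvAddRow, hj] using this

theorem pv_build_getD (rs : List (List String)) (d : PySem.Dict Int (List Int)) (j : Int) (hj : 0 ≤ j) :
    (rs.foldl pvAddRow d).getD j []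
      = d.getD j [] ++ (rs.filterMap (fun r => PySem.List.pyGet? r j)).map pvIntOf := by
  induction rs generalizing d with
  | nil => simp
  | cons r rs ih =>
    rw [List.foldl_cons, ih, pv_addRow_getD _ _ _ hj, List.filterMap_cons]
    cases PySem.List.pyGet? r j <;> simp

theorem pv_alt_concat (init : List String) (last : String) :
    part1_alt (init ++ [last]) =
      (PySem.List.enumerate (PySem.Str.split₀ last) 0).foldl
        (fun ans jop => ans +
          (if jop.2 = "*" then
            (((init.map PySem.Str.split₀).filterMap (fun r => PySem.List.pyGet? r jop.1)).map pvIntOf).foldl (· * ·) 1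
           else
            (((init.map PySem.Str.split₀).filterMap (fun r => PySem.List.pyGet? r jop.1)).map pvIntOf).foldl (· + ·) 0)) 0 := by
  cases init with
  | nil => simp [part1_alt]
  | cons a l =>
    have h1 : (a :: (l ++ [last])).getLast?.getD "" = last := by
      rw [← List.cons_append, List.getLast?_concat]; rfl
    have h2 : (a :: (l ++ [last])).dropLast = a :: l := by
      rw [← List.cons_append, List.dropLast_concat]
    simp [part1_alt, h1, h2]

theorem part1_eq (data : List String) : part1 data = part1_alt data := by
  rcases List.eq_nil_or_concat data with h | ⟨init, last, h⟩
  · subst h; rfl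
  · rw [List.concat_eq_append] at h
    subst h
    rw [pv_alt_concat]
    unfold part1
    have hlen : ((init ++ [last]).length : Int) - 1 = (init.length : Int) := by
      simp
    rw [PySem.List.enumerate_append, List.foldl_append]
    -- build phase: every index in enumerate init 0 is < init.length, so the else branch runs
    have hbuild :
        (PySem.List.enumerate init 0).foldl
          (fun (st : Int × PySem.Dict Int (List Int)) idxLine =>
            (PySem.List.enumerate (PySem.Str.split₀ idxLine.2) 0).foldl
              (fun st jc =>
                if idxLine.1 = ((init ++ [last]).length : Int) - 1 then
                  if jc.2 = "*" then
                    (st.1 + (st.2.getD jc.1 []).foldl (· * ·) 1, st.2)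
                  else
                    (st.1 + (st.2.getD jc.1 []).foldl (· + ·) 0, st.2)
                else
                  (st.1, st.2.insert jc.1 (st.2.getD jc.1 [] ++ [pvIntOf jc.2]))) st)
          ((0 : Int), (PySem.Dict.mk [] : PySem.Dict Int (List Int)))
        = ((0 : Int), (init.map PySem.Str.split₀).foldl pvAddRow (PySem.Dict.mk [])) := by
      refine (PySem.List.foldl_congr_mem _ _
        (fun st idxLine => (st.1, pvAddRow st.2 (PySem.Str.split₀ idxLine.2))) _ ?_).trans ?_
      · intro acc x hx
        obtain ⟨a, d⟩ := acc
        obtain ⟨k, hk, hxeq⟩ := (PySem.List.mem_enumerate_iff _ _ _).1 hx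
        have hne : x.1 ≠ ((init ++ [last]).length : Int) - 1 := by
          rw [hxeq, hlen]; push_cast; omega
        simp only [if_neg hne, pvAddRow]
        exact pv_foldl_pair _ (fun (d : PySem.Dict Int (List Int)) (jc : Int × String) => d.insert jc.1 (d.getD jc.1 [] ++ [pvIntOf jc.2])) a d
      · refine (pv_foldl_pair (PySem.List.enumerate init 0)
          (fun d idxLine => pvAddRow d (PySem.Str.split₀ idxLine.2)) (0 : Int)
          (PySem.Dict.mk [])).trans ?_
        congr 1
        conv_rhs => rw [← PySem.List.map_snd_enumerate (xs := init) (s := 0)]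
        rw [List.foldl_map, List.foldl_map]
    rw [hbuild]
    -- last phase: the single remaining row is the operator row
    rw [PySem.List.enumerate_cons, PySem.List.enumerate_nil, List.foldl_cons, List.foldl_nil]
    have hidx : ((0 : Int) + (init.length : Int)) = ((init ++ [last]).length : Int) - 1 := by
      rw [hlen]; omega
    simp only [hidx, if_true]
    rw [pv_foldl_sumphase]
    refine PySem.List.foldl_congr_mem _ _ _ _ ?_
    intro acc jc hjc
    obtain ⟨k, hk, hjceq⟩ := (PySem.List.mem_enumerate_iff _ _ _).1 hjc
    have hj0 : (0 : Int) ≤ jc.1 := by rw [hjceq]; simp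
    have hcol : ((init.map PySem.Str.split₀).foldl pvAddRow (PySem.Dict.mk [])).getD jc.1 [] =
        ((init.map PySem.Str.split₀).filterMap (fun r => PySem.List.pyGet? r jc.1)).map pvIntOf := by
      rw [pv_build_getD _ _ _ hj0]
      simp [PySem.Dict.getD, PySem.Dict.get?]
    rw [hcol]

-- ===== VERDICT (by name: the statement is the Claim_ definition above) =====
theorem part1_spec : Claim_equal_part1 := by
  intro data _ _
  unfold Spec_part1
  exact part1_eq data
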